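-- pv_equiv track=rewrite | github.com/Naman18055/CF-Solutions | Round 630/D.py | calc
-- ===== SOURCE A (Python) =====
-- def calc(a):
-- 	n=len(a)
-- 	m=len(a[0])
-- 	dp=[[0 for i in range(m)] for j in range(n)]
-- 	dp[0][0]=a[0][0]
-- 	for i in range(n):
-- 		for j in range(m):
-- 			if  i==0 and j==0:
-- 				continue
-- 			if i!=0 and j!=0:
-- 				dp[i][j]=max(dp[i-1][j]&a[i][j],dp[i][j-1]&a[i][j])
-- 			elif i==0:
-- 				dp[i][j]=dp[i][j-1]&a[i][j]
-- 			else: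
-- 				dp[i][j]=dp[i-1][j]&a[i][j]
-- 	print (dp)
-- 	return dp[i][j]
-- ===== SOURCE B (Python) =====
-- def calc(a):
--     n = len(a)
--     m = len(a[0])
--     memo = {}
--
--     def f(i, j):
--         if (i, j) in memo:
--             return memo[(i, j)]
--         if i == 0 and j == 0:
--             v = a[0][0]
--         elif i == 0:
--             v = f(0, j - 1) & a[0][j]
--         elif j == 0:
--             v = f(i - 1, 0) & a[i][0]
--         else:
--             v = max(f(i - 1, j) & a[i][j], f(i, j - 1) & a[i][j])
--         memo[(i, j)] = v
--         return v
--
--     dp = [[f(i, j) for j in range(m)] for i in range(n)]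
--     print(dp)
--     return dp[n - 1][m - 1]
-- ===== Notes on version B (the rewrite author's own statement) =====
-- stated objective: alternative
-- what changed: Replaces the bottom-up row-by-row sweep over an in-place 2D table with a top-down memoized recursion f(i,j) over the AND-path recurrence; the table is then materialized from f on demand.
import Mathlib
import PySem

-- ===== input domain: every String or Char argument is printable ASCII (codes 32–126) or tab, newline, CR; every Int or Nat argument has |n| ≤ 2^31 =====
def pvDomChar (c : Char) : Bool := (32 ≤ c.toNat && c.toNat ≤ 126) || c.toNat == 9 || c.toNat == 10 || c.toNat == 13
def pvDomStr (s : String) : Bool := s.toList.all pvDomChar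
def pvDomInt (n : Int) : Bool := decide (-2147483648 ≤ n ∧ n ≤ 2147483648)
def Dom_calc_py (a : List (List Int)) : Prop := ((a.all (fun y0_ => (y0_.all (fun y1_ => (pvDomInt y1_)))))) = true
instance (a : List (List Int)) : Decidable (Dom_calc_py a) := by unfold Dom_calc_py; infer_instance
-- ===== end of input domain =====

-- B is an alternative decomposition (top-down memoized recursion instead of the bottom-up
-- table sweep); equivalence is about the return value only — both Pythons also print the dp table.

-- ===== PORT A =====
-- dp[p][q] read / write (indices are the loop counters, always nonnegative; under Pre_ all
-- accesses are in range, so the getD defaults are never the value A would have raised on).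
def pvGet2 (dp : List (List Int)) (p q : Nat) : Int := (dp.getD p []).getD q 0

def pvSet2 (dp : List (List Int)) (p q : Nat) (v : Int) : List (List Int) :=
  dp.set p ((dp.getD p []).set q v)

-- body of A's inner `for j in range(m)` loop, branch for branch
def pvStepA (a : List (List Int)) (i : Nat) (dp : List (List Int)) (j : Nat) : List (List Int) :=
  if i = 0 ∧ j = 0 then dp
  else if i ≠ 0 ∧ j ≠ 0 then
    pvSet2 dp i j (max (PySem.Int.band (pvGet2 dp (i-1) j) (pvGet2 a i j))
                       (PySem.Int.band (pvGet2 dp i (j-1)) (pvGet2 a i j)))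
  else if i = 0 then
    pvSet2 dp i j (PySem.Int.band (pvGet2 dp i (j-1)) (pvGet2 a i j))
  else
    pvSet2 dp i j (PySem.Int.band (pvGet2 dp (i-1) j) (pvGet2 a i j))

-- A returns dp[i][j] with the leftover loop variables; under Pre_ both loops run, so i = n-1, j = m-1.
def calc_py (a : List (List Int)) : Int :=
  let n := a.length
  let m := (a.getD 0 []).length
  let dp0 : List (List Int) := (List.range n).map (fun _ => (List.range m).map (fun _ => (0 : Int)))
  let dp1 := pvSet2 dp0 0 0 (pvGet2 a 0 0)
  let dpF := (List.range n).foldl (fun dp i => (List.range m).foldl (pvStepA a i) dp) dp1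
  pvGet2 dpF (n-1) (m-1)

-- ===== PORT B =====
-- Source B's memoized f(i, j); the mutable memo dict is threaded through explicitly.
def pvFB (a : List (List Int)) : Nat → Nat → PySem.Dict (Int × Int) Int →
    Int × PySem.Dict (Int × Int) Int
  | i, j, memo =>
    match PySem.Dict.get? memo ((i : Int), (j : Int)) with
    | some v => (v, memo)
    | none =>
      let vm : Int × PySem.Dict (Int × Int) Int :=
        match i, j with
        | 0, 0 => (pvGet2 a 0 0, memo)
        | 0, j'+1 =>
          let xm := pvFB a 0 j' memo
          (PySem.Int.band xm.1 (pvGet2 a 0 (j'+1)), xm.2)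
        | i'+1, 0 =>
          let xm := pvFB a i' 0 memo
          (PySem.Int.band xm.1 (pvGet2 a (i'+1) 0), xm.2)
        | i'+1, j'+1 =>
          let xm := pvFB a i' (j'+1) memo
          let ym := pvFB a (i'+1) j' xm.2
          (max (PySem.Int.band xm.1 (pvGet2 a (i'+1) (j'+1)))
               (PySem.Int.band ym.1 (pvGet2 a (i'+1) (j'+1))), ym.2)
      (vm.1, PySem.Dict.insert vm.2 ((i : Int), (j : Int)) vm.1)
  termination_by i j _ => (i, j)

def calc_py_alt (a : List (List Int)) : Int :=
  let n := a.length
  let m := (a.getD 0 []).length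
  let build := (List.range n).foldl
    (fun (acc : List (List Int) × PySem.Dict (Int × Int) Int) i =>
      let rowm := (List.range m).foldl
        (fun (racc : List Int × PySem.Dict (Int × Int) Int) j =>
          let vm := pvFB a i j racc.2
          (racc.1 ++ [vm.1], vm.2)) ([], acc.2)
      (acc.1 ++ [rowm.1], rowm.2))
    ([], PySem.Dict.empty)
  pvGet2 build.1 (n-1) (m-1)

-- ===== PRECONDITION & SPEC =====
-- Pre_ is exactly where Python A returns: a nonempty, first row nonempty, and every row at least
-- as long as the first (otherwise a[0], dp[0][0]=a[0][0] or a[i][j] raises IndexError).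
def Pre_calc_py (a : List (List Int)) : Prop :=
  0 < (a.getD 0 []).length ∧ ∀ r ∈ a, (a.getD 0 []).length ≤ r.length
instance (a : List (List Int)) : Decidable (Pre_calc_py a) := by unfold Pre_calc_py; infer_instance

def pvWitness_calc_py : List (List Int) := [[3, 7], [5, 6]]

def Spec_calc_py (a : List (List Int)) (out : Int) : Prop := out = calc_py_alt a
instance (a : List (List Int)) (out : Int) : Decidable (Spec_calc_py a out) := by
  unfold Spec_calc_py; infer_instance

-- ===== CLAIM (what is proved, stated in full; the proofs are below) =====
def Claim_equal_calc_py : Prop :=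
  ∀ (a : List (List Int)), Dom_calc_py a → Pre_calc_py a → Spec_calc_py a (calc_py a)

-- ===== LEMMAS AND PROOFS =====

-- the common mathematical recurrence both programs compute
def pvG (a : List (List Int)) : Nat → Nat → Int
  | 0, 0 => pvGet2 a 0 0
  | 0, j+1 => PySem.Int.band (pvG a 0 j) (pvGet2 a 0 (j+1))
  | i+1, 0 => PySem.Int.band (pvG a i 0) (pvGet2 a (i+1) 0)
  | i+1, j+1 => max (PySem.Int.band (pvG a i (j+1)) (pvGet2 a (i+1) (j+1)))
                    (PySem.Int.band (pvG a (i+1) j) (pvGet2 a (i+1) (j+1)))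

theorem pvG_eq (a : List (List Int)) (i j : Nat) :
    pvG a i j = if i = 0 ∧ j = 0 then pvGet2 a 0 0
      else if i = 0 then PySem.Int.band (pvG a 0 (j-1)) (pvGet2 a 0 j)
      else if j = 0 then PySem.Int.band (pvG a (i-1) 0) (pvGet2 a i 0)
      else max (PySem.Int.band (pvG a (i-1) j) (pvGet2 a i j))
               (PySem.Int.band (pvG a i (j-1)) (pvGet2 a i j)) := by
  match i, j with
  | 0, 0 => simp [pvG]
  | 0, j+1 => simp [pvG]
  | i+1, 0 => simp [pvG]
  | i+1, j+1 => simp [pvG]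

theorem pv_getD_set_self {α : Type} (l : List α) (i : Nat) (x d : α) (h : i < l.length) :
    (l.set i x).getD i d = x := by
  rw [List.getD_eq_getElem?_getD, List.getElem?_set_self h, Option.getD_some]

theorem pv_getD_set_ne {α : Type} (l : List α) (i k : Nat) (x d : α) (h : i ≠ k) :
    (l.set i x).getD k d = l.getD k d := by
  rw [List.getD_eq_getElem?_getD, List.getElem?_set_ne h, ← List.getD_eq_getElem?_getD]

theorem get2_set2_self {dp : List (List Int)} {p q : Nat} (v : Int)
    (hp : p < dp.length) (hq : q < (dp.getD p []).length) :
    pvGet2 (pvSet2 dp p q v) p q = v := by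
  unfold pvGet2 pvSet2
  rw [pv_getD_set_self _ _ _ _ hp, pv_getD_set_self _ _ _ _ hq]

theorem get2_set2_ne {dp : List (List Int)} {p q p' q' : Nat} (v : Int)
    (h : p ≠ p' ∨ q ≠ q') :
    pvGet2 (pvSet2 dp p q v) p' q' = pvGet2 dp p' q' := by
  unfold pvGet2 pvSet2
  by_cases hp : p = p'
  · subst hp
    rcases h with h | h
    · exact absurd rfl h
    · by_cases hlen : p < dp.length
      · rw [pv_getD_set_self _ _ _ _ hlen, pv_getD_set_ne _ _ _ _ _ h]
      · rw [List.set_eq_of_length_le (by omega)]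
  · rw [pv_getD_set_ne _ _ _ _ _ hp]

-- the invariant for A's sweep: correct shape, and every already-computed cell equals pvG
def pvInv (a : List (List Int)) (dp : List (List Int)) (i j : Nat) : Prop :=
  dp.length = a.length ∧ (∀ r ∈ dp, r.length = (a.getD 0 []).length) ∧
  ∀ p q, p < a.length → q < (a.getD 0 []).length →
    (p < i ∨ (p = i ∧ q < j) ∨ (p = 0 ∧ q = 0)) → pvGet2 dp p q = pvG a p q

theorem inv_set (a : List (List Int)) (dp : List (List Int)) (i j : Nat)
    (hi : i < a.length) (hj : j < (a.getD 0 []).length)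
    (h : pvInv a dp i j) (v : Int) (hv : v = pvG a i j) :
    pvInv a (pvSet2 dp i j v) i (j+1) := by
  obtain ⟨hL, hR, hC⟩ := h
  have hrow : (dp.getD i []).length = (a.getD 0 []).length := by
    rw [List.getD_eq_getElem (l := dp) [] (by omega)]
    exact hR _ (List.getElem_mem _)
  refine ⟨?_, ?_, ?_⟩
  · simpa [pvSet2] using hL
  · intro r hr
    rcases List.mem_or_eq_of_mem_set hr with hr' | hr'
    · exact hR r hr'
    · rw [hr', List.length_set, hrow]
  · intro p q hp hq hreg
    by_cases hpq : p = i ∧ q = j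
    · obtain ⟨rfl, rfl⟩ := hpq
      rw [get2_set2_self v (by omega) (by omega), hv]
    · rw [get2_set2_ne v (by omega)]
      exact hC p q hp hq (by omega)

theorem inv_step (a : List (List Int)) (dp : List (List Int)) (i j : Nat)
    (hi : i < a.length) (hj : j < (a.getD 0 []).length)
    (h : pvInv a dp i j) : pvInv a (pvStepA a i dp j) i (j+1) := by
  have hC := h.2.2
  unfold pvStepA
  split_ifs with h00 h11 h0
  · obtain ⟨hL, hR, hC'⟩ := h
    exact ⟨hL, hR, fun p q hp hq hreg => hC' p q hp hq (by omega)⟩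
  · refine inv_set a dp i j hi hj h _ ?_
    rw [pvG_eq, if_neg h00, if_neg h11.1, if_neg h11.2,
      hC (i-1) j (by omega) hj (by omega), hC i (j-1) hi (by omega) (by omega)]
  · refine inv_set a dp i j hi hj h _ ?_
    have hjne : j ≠ 0 := by
      intro hj0; exact h00 ⟨h0, hj0⟩
    subst h0
    rw [pvG_eq, if_neg h00, if_pos rfl,
      hC 0 (j-1) hi (by omega) (by omega)]
  · refine inv_set a dp i j hi hj h _ ?_
    have hj0 : j = 0 := by
      by_contra hjne; exact h11 ⟨h0, hjne⟩
    subst hj0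
    rw [pvG_eq, if_neg h00, if_neg h0, if_pos rfl,
      hC (i-1) 0 (by omega) hj (by omega)]

theorem inv_inner (a : List (List Int)) (i : Nat) (hi : i < a.length) :
    ∀ (cnt s : Nat) (dp : List (List Int)), s + cnt = (a.getD 0 []).length →
      pvInv a dp i s →
      pvInv a ((List.range' s cnt).foldl (pvStepA a i) dp) i (a.getD 0 []).length := by
  intro cnt
  induction cnt with
  | zero =>
    intro s dp hs h
    have hsM : s = (a.getD 0 []).length := by omega
    rw [List.range'_zero, List.foldl_nil, ← hsM]
    exact h
  | succ c ih =>
    intro s dp hs h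
    rw [List.range'_succ, List.foldl_cons]
    exact ih (s+1) _ (by omega) (inv_step a dp i s hi (by omega) h)

theorem inv_next_row (a : List (List Int)) (dp : List (List Int)) (i : Nat)
    (h : pvInv a dp i ((a.getD 0 []).length)) : pvInv a dp (i+1) 0 := by
  obtain ⟨h1, h2, h3⟩ := h
  exact ⟨h1, h2, fun p q hp hq hreg => h3 p q hp hq (by omega)⟩

theorem inv_outer (a : List (List Int)) :
    ∀ (cnt s : Nat) (dp : List (List Int)), s + cnt = a.length →
      pvInv a dp s 0 →
      pvInv a ((List.range' s cnt).foldl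
        (fun dp i => (List.range (a.getD 0 []).length).foldl (pvStepA a i) dp) dp)
        a.length 0 := by
  intro cnt
  induction cnt with
  | zero =>
    intro s dp hs h
    have hsN : s = a.length := by omega
    rw [List.range'_zero, List.foldl_nil, ← hsN]
    exact h
  | succ c ih =>
    intro s dp hs h
    rw [List.range'_succ, List.foldl_cons]
    refine ih (s+1) _ (by omega) ?_
    refine inv_next_row a _ s ?_
    rw [List.range_eq_range']
    exact inv_inner a s (by omega) _ 0 dp (by omega) h

-- the memo invariant for B: every entry equals pvG
def pvMemoInv (a : List (List Int)) (memo : PySem.Dict (Int × Int) Int) : Prop :=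
  ∀ (p q : Nat) (v : Int), PySem.Dict.get? memo ((p : Int), (q : Int)) = some v → v = pvG a p q

theorem memoInv_insert (a : List (List Int)) (memo : PySem.Dict (Int × Int) Int)
    (i j : Nat) (v : Int) (h : pvMemoInv a memo) (hv : v = pvG a i j) :
    pvMemoInv a (PySem.Dict.insert memo ((i : Int), (j : Int)) v) := by
  intro p q w hw
  rw [PySem.Dict.get?_insert] at hw
  split at hw
  · rename_i hk
    obtain ⟨hk1, hk2⟩ := Prod.mk.injEq .. ▸ hk
    have hp : p = i := by exact_mod_cast hk1
    have hq : q = j := by exact_mod_cast hk2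
    subst hp; subst hq
    cases hw
    exact hv
  · exact h p q w hw

theorem pvFB_correct (a : List (List Int)) :
    ∀ (i j : Nat) (memo : PySem.Dict (Int × Int) Int), pvMemoInv a memo →
      (pvFB a i j memo).1 = pvG a i j ∧ pvMemoInv a (pvFB a i j memo).2 := by
  have main : ∀ (N i j : Nat) (memo : PySem.Dict (Int × Int) Int), i + j ≤ N →
      pvMemoInv a memo →
      (pvFB a i j memo).1 = pvG a i j ∧ pvMemoInv a (pvFB a i j memo).2 := by
    intro N
    induction N with
    | zero =>
      intro i j memo hle hmemo
      have hi : i = 0 := by omega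
      have hj : j = 0 := by omega
      subst hi; subst hj
      rw [pvFB]
      cases hget : PySem.Dict.get? memo ((0 : Int), (0 : Int)) with
      | some v => exact ⟨hmemo 0 0 v hget, hmemo⟩
      | none => exact ⟨by simp [pvG], memoInv_insert a memo 0 0 _ hmemo (by simp [pvG])⟩
    | succ N ih =>
      intro i j memo hle hmemo
      cases i with
      | zero =>
        cases j with
        | zero =>
          rw [pvFB]
          cases hget : PySem.Dict.get? memo (((0 : Nat) : Int), ((0 : Nat) : Int)) with
          | some v => exact ⟨hmemo 0 0 v hget, hmemo⟩
          | none =>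
            exact ⟨by simp [pvG], memoInv_insert a memo 0 0 _ hmemo (by simp [pvG])⟩
        | succ j' =>
          rw [pvFB]
          cases hget : PySem.Dict.get? memo (((0 : Nat) : Int), ((j'+1 : Nat) : Int)) with
          | some v => exact ⟨hmemo 0 (j'+1) v hget, hmemo⟩
          | none =>
            obtain ⟨h1, h2⟩ := ih 0 j' memo (by omega) hmemo
            exact ⟨by simp [pvG, h1],
              memoInv_insert a _ 0 (j'+1) _ h2 (by simp [pvG, h1])⟩
      | succ i' =>
        cases j with
        | zero =>
          rw [pvFB]
          cases hget : PySem.Dict.get? memo (((i'+1 : Nat) : Int), ((0 : Nat) : Int)) with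
          | some v => exact ⟨hmemo (i'+1) 0 v hget, hmemo⟩
          | none =>
            obtain ⟨h1, h2⟩ := ih i' 0 memo (by omega) hmemo
            exact ⟨by simp [pvG, h1],
              memoInv_insert a _ (i'+1) 0 _ h2 (by simp [pvG, h1])⟩
        | succ j' =>
          rw [pvFB]
          cases hget : PySem.Dict.get? memo (((i'+1 : Nat) : Int), ((j'+1 : Nat) : Int)) with
          | some v => exact ⟨hmemo (i'+1) (j'+1) v hget, hmemo⟩
          | none =>
            obtain ⟨h1, h2⟩ := ih i' (j'+1) memo (by omega) hmemo
            obtain ⟨h3, h4⟩ := ih (i'+1) j' (pvFB a i' (j'+1) memo).2 (by omega) h2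
            exact ⟨by simp [pvG, h1, h3],
              memoInv_insert a _ (i'+1) (j'+1) _ h4 (by simp [pvG, h1, h3])⟩
  intro i j memo hmemo
  exact main (i + j) i j memo (le_refl _) hmemo

theorem alt_inner (a : List (List Int)) (i : Nat) :
    ∀ (c s : Nat) (row : List Int) (memo : PySem.Dict (Int × Int) Int), pvMemoInv a memo →
      ((List.range' s c).foldl
          (fun (racc : List Int × PySem.Dict (Int × Int) Int) j =>
            let vm := pvFB a i j racc.2
            (racc.1 ++ [vm.1], vm.2)) (row, memo)).1
        = row ++ (List.range' s c).map (pvG a i) ∧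
      pvMemoInv a (((List.range' s c).foldl
          (fun (racc : List Int × PySem.Dict (Int × Int) Int) j =>
            let vm := pvFB a i j racc.2
            (racc.1 ++ [vm.1], vm.2)) (row, memo)).2) := by
  intro c
  induction c with
  | zero => intro s row memo hmemo; simp [hmemo]
  | succ c ih =>
    intro s row memo hmemo
    rw [List.range'_succ, List.foldl_cons]
    obtain ⟨hv, hm⟩ := pvFB_correct a i s memo hmemo
    obtain ⟨ih1, ih2⟩ := ih (s+1) (row ++ [(pvFB a i s memo).1]) (pvFB a i s memo).2 hm
    refine ⟨?_, ih2⟩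
    rw [ih1, hv, List.map_cons, List.append_assoc]
    rfl

theorem alt_outer (a : List (List Int)) :
    ∀ (c s : Nat) (dpacc : List (List Int)) (memo : PySem.Dict (Int × Int) Int),
      pvMemoInv a memo →
      ((List.range' s c).foldl
          (fun (acc : List (List Int) × PySem.Dict (Int × Int) Int) i =>
            let rowm := (List.range (a.getD 0 []).length).foldl
              (fun (racc : List Int × PySem.Dict (Int × Int) Int) j =>
                let vm := pvFB a i j racc.2
                (racc.1 ++ [vm.1], vm.2)) ([], acc.2)
            (acc.1 ++ [rowm.1], rowm.2)) (dpacc, memo)).1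
        = dpacc ++ (List.range' s c).map
            (fun i => (List.range (a.getD 0 []).length).map (pvG a i)) := by
  intro c
  induction c with
  | zero => intro s dpacc memo hmemo; simp
  | succ c ih =>
    intro s dpacc memo hmemo
    rw [List.range'_succ, List.foldl_cons]
    have hin := alt_inner a s (a.getD 0 []).length 0 [] memo hmemo
    rw [← List.range_eq_range'] at hin
    obtain ⟨hin1, hin2⟩ := hin
    rw [ih (s+1) _ _ hin2, hin1, List.map_cons, List.append_assoc]
    simp

theorem alt_eq_pvG (a : List (List Int)) (h : Pre_calc_py a) (hn : 0 < a.length) :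
    calc_py_alt a = pvG a (a.length - 1) ((a.getD 0 []).length - 1) := by
  obtain ⟨hm, _⟩ := h
  simp only [calc_py_alt]
  have hempty : pvMemoInv a PySem.Dict.empty := by
    intro p q v hv
    simp [PySem.Dict.get?_empty] at hv
  rw [List.range_eq_range' (n := a.length),
    alt_outer a a.length 0 [] PySem.Dict.empty hempty, List.nil_append]
  unfold pvGet2
  rw [List.getD_eq_getElem _ [] (by rw [List.length_map, List.length_range']; omega),
    List.getElem_map, List.getElem_range',
    List.getD_eq_getElem _ 0 (by rw [List.length_map, List.length_range]; omega),
    List.getElem_map, List.getElem_range]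
  simp

theorem a_eq_pvG (a : List (List Int)) (h : Pre_calc_py a) (hn : 0 < a.length) :
    calc_py a = pvG a (a.length - 1) ((a.getD 0 []).length - 1) := by
  obtain ⟨hm, _⟩ := h
  simp only [calc_py]
  have hd0 : (((List.range a.length).map
      (fun _ => (List.range (a.getD 0 []).length).map (fun _ => (0 : Int)))).getD 0 [])
      = (List.range (a.getD 0 []).length).map (fun _ => (0 : Int)) := by
    rw [List.getD_eq_getElem _ [] (by simpa using hn)]
    simp
  have hinv1 : pvInv a (pvSet2 ((List.range a.length).map
      (fun _ => (List.range (a.getD 0 []).length).map (fun _ => (0 : Int)))) 0 0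
      (pvGet2 a 0 0)) 0 0 := by
    refine ⟨by simp [pvSet2], ?_, ?_⟩
    · intro r hr
      rcases List.mem_or_eq_of_mem_set hr with hr' | hr'
      · obtain ⟨x, _, hx⟩ := List.mem_map.mp hr'
        rw [← hx]; simp
      · rw [hr', List.length_set, hd0]; simp
    · intro p q hp hq hreg
      have hp0 : p = 0 := by omega
      have hq0 : q = 0 := by omega
      subst hp0; subst hq0
      rw [get2_set2_self _ (by simpa using hn) (by rw [hd0]; simpa using hm)]
      simp [pvG]
  have hfin := inv_outer a a.length 0 _ (by omega) hinv1
  rw [← List.range_eq_range'] at hfin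
  exact hfin.2.2 (a.length - 1) ((a.getD 0 []).length - 1) (by omega) (by omega) (by omega)

-- ===== VERDICT (by name: the statement is the Claim_ definition above) =====
theorem calc_py_spec : Claim_equal_calc_py := by
  intro a _ hpre
  unfold Spec_calc_py
  by_cases hn : 0 < a.length
  · rw [a_eq_pvG a hpre hn, alt_eq_pvG a hpre hn]
  · exfalso
    have := hpre.1
    simp [List.getD_eq_getElem?_getD, List.getElem?_eq_none (by omega : a.length ≤ 0)] at this
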